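-- pv_equiv track=rewrite | github.com/rrosevic/comp110-22f-workspace | exercises/ex07/dictionary.py | count
-- ===== SOURCE A (Python) =====
-- def count(count_list: list[str]) -> dict[str, int]:
--     """Given strings, returns a count of the number of times each str appeared."""
--     result: dict[str, int] = {}
--     for word in count_list:
--         if word in result:
--             result[word] += 1
--         else:
--             result[word] = 1
--     return result
-- ===== SOURCE B (Python) =====
-- def count(count_list: list[str]) -> dict[str, int]:
--     """Given strings, returns a count of the number of times each str appeared."""
--     words = list(dict.fromkeys(count_list))  # distinct words, first-occurrence order
--     return {w: count_list.count(w) for w in words}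
-- ===== Notes on version B (the rewrite author's own statement) =====
-- stated objective: alternative
-- what changed: B replaces A's single-pass incremental dict accumulation with two staged passes: first dedupe the list in first-occurrence order via dict.fromkeys, then build the result in one dict comprehension mapping each distinct word to list.count; no dict entry is ever tested or updated.
import Mathlib
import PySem

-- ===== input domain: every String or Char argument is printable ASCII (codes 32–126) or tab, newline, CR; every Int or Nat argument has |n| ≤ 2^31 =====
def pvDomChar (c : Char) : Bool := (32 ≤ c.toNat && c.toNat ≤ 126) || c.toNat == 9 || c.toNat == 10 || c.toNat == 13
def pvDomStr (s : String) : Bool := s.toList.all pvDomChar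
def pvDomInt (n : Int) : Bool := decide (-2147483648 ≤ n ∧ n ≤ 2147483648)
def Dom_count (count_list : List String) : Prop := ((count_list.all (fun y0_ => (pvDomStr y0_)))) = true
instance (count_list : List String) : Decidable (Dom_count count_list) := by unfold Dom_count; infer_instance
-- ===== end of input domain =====

-- B builds the dict in two staged passes (dedupe via dict.fromkeys, then one comprehension with list.count) instead of A's incremental accumulation; same dict, alternative strategy.

-- ===== PORT A =====
def count (count_list : List String) : List (String × Int) :=
  (count_list.foldl
    (fun result word =>
      if result.contains word then result.insert word (result.getD word 0 + 1)
      else result.insert word 1)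
    (PySem.Dict.empty : PySem.Dict String Int)).items

-- ===== PORT B =====
-- words = list(dict.fromkeys(count_list)); {w: count_list.count(w) for w in words}
-- (the comprehension's keys are distinct, so the resulting dict is exactly this pair list)
def count_alt (count_list : List String) : List (String × Int) :=
  (PySem.List.dedup count_list).map (fun w => (w, (count_list.count w : Int)))

-- ===== PRECONDITION & SPEC =====
def Spec_count (count_list : List String) (out : List (String × Int)) : Prop := out = count_alt count_list
instance (count_list : List String) (out : List (String × Int)) : Decidable (Spec_count count_list out) := by unfold Spec_count; infer_instance

-- ===== CLAIM (what is proved, stated in full; the proofs are below) =====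
def Claim_equal_count : Prop := ∀ (count_list : List String), Dom_count count_list → Spec_count count_list (count count_list)

-- ===== LEMMAS AND PROOFS =====

-- A's loop body is exactly the insert-(getD+1) counting step.
lemma a_step_eq :
    (fun (result : PySem.Dict String Int) (word : String) =>
      if result.contains word then result.insert word (result.getD word 0 + 1)
      else result.insert word 1)
    = (fun (result : PySem.Dict String Int) (word : String) =>
        result.insert word (result.getD word 0 + 1)) := by
  funext d w
  by_cases h : d.contains w = true
  · simp [h]
  · simp only [Bool.not_eq_true] at h
    simp [h, PySem.Dict.getD_of_not_contains _ _ h]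

-- ===== VERDICT (by name: the statement is the Claim_ definition above) =====
theorem count_spec : Claim_equal_count := by
  intro xs _
  show count xs = count_alt xs
  unfold count count_alt
  rw [a_step_eq, PySem.Dict.foldl_insert_getD_add_one_eq_counter,
      PySem.Dict.items_counter, PySem.List.dedup_eq_ofList]
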